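-- pv_equiv track=rewrite | github.com/nyjc-computing-2425/assignment-5b-kaien07 | main.py | sum_by_year
-- ===== SOURCE A (Python) =====
-- def sum_by_year(enrolment):
--     """
-- Takes a list of records enrolment, adds up total enrolment for each year, returns result as a list of lists, each inner list comprising of two integers, year and total_enrolment
--     """
--     year_list = []
--     my_sum = 0
--     enrolment_list = []
--     for elem in enrolment:
--         if elem[0] not in year_list:
--             year_list.append(elem[0])
--     for year in year_list:
--         for elem in enrolment:
--            if elem[0] == year:
--                my_sum += elem[-1]
--         enrolment_list.append([year, my_sum])
--         my_sum = 0
--     return enrolment_list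
-- ===== SOURCE B (Python) =====
-- def sum_by_year(enrolment):
--     totals = {}
--     for rec in enrolment:
--         totals[rec[0]] = totals.get(rec[0], 0) + rec[-1]
--     return [[year, total] for year, total in totals.items()]
-- ===== Notes on version B (the rewrite author's own statement) =====
-- stated objective: alternative
-- what changed: Replaced the two-phase algorithm (collect distinct years, then rescan the whole input once per distinct year) by a single pass that accumulates each record's total into an insertion-ordered dict, then emits its items.
import Mathlib
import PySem

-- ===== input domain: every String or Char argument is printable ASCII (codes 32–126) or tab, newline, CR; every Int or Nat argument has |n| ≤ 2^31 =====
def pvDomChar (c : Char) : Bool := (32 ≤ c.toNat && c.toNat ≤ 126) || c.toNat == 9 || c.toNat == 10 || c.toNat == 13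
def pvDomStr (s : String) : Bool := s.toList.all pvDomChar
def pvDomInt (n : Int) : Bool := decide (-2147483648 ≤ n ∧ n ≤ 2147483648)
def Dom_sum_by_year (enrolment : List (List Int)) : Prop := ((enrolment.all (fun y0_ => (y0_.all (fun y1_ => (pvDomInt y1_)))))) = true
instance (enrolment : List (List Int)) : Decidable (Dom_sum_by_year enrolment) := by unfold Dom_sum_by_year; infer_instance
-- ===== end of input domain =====

-- B replaces A's per-distinct-year rescans of the whole input by a single accumulating
-- pass into an insertion-ordered dict.
-- Both Pythons raise IndexError on an empty inner record; Pre_ excludes exactly those inputs.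


-- ===== PORT A =====
-- elem[0] / elem[-1]; exact wherever the inner list is nonempty (Pre_ guarantees this;
-- on [] Python raises IndexError and PySem.List.pyGet? is none, defaulted here with .getD 0).
def pvFirst (e : List Int) : Int := (PySem.List.pyGet? e 0).getD 0
def pvLast (e : List Int) : Int := (PySem.List.pyGet? e (-1)).getD 0

def sum_by_year (enrolment : List (List Int)) : List (List Int) :=
  -- first loop: year_list of first occurrences
  let year_list := enrolment.foldl
    (fun acc elem => if pvFirst elem ∈ acc then acc else acc ++ [pvFirst elem]) []
  -- second loop: for each year, rescan enrolment summing matching last elements (my_sum reset to 0 each round)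
  year_list.foldl
    (fun out year =>
      out ++ [[year, enrolment.foldl
        (fun my_sum elem => if pvFirst elem = year then my_sum + pvLast elem else my_sum) 0]]) []

-- ===== PORT B =====
-- totals[rec[0]] = totals.get(rec[0], 0) + rec[-1] is Dict.modify; then emit items as pairs-in-lists.
def sum_by_year_alt (enrolment : List (List Int)) : List (List Int) :=
  let totals := enrolment.foldl
    (fun d rec => d.modify (pvFirst rec) 0 (· + pvLast rec)) PySem.Dict.empty
  totals.items.map (fun p => [p.1, p.2])

-- ===== PRECONDITION & SPEC =====
-- Pre_ excludes inputs containing an empty record, on which Python A raises IndexError (elem[0]).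
def Pre_sum_by_year (enrolment : List (List Int)) : Prop := ∀ e ∈ enrolment, e ≠ []
instance (enrolment : List (List Int)) : Decidable (Pre_sum_by_year enrolment) := by unfold Pre_sum_by_year; infer_instance
def pvWitness_sum_by_year : List (List Int) := [[2020, 5], [2021, 7], [2020, 3]]
def Spec_sum_by_year (enrolment : List (List Int)) (out : List (List Int)) : Prop := out = sum_by_year_alt enrolment
instance (enrolment : List (List Int)) (out : List (List Int)) : Decidable (Spec_sum_by_year enrolment out) := by unfold Spec_sum_by_year; infer_instance

-- ===== CLAIM (what is proved, stated in full; the proofs are below) =====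
def Claim_equal_sum_by_year : Prop := ∀ (enrolment : List (List Int)), Dom_sum_by_year enrolment → Pre_sum_by_year enrolment → Spec_sum_by_year enrolment (sum_by_year enrolment)

-- ===== LEMMAS AND PROOFS =====

-- getD of B's accumulation loop is A's inner filtered-sum loop, from any start dict.
theorem pv_getD_fold (l : List (List Int)) (d : PySem.Dict Int Int) (y : Int) :
    (l.foldl (fun d rec => d.modify (pvFirst rec) 0 (· + pvLast rec)) d).getD y 0
      = l.foldl (fun s e => if pvFirst e = y then s + pvLast e else s) (d.getD y 0) := by
  induction l generalizing d with
  | nil => rfl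
  | cons e t ih =>
    simp only [List.foldl_cons, ih]
    rw [PySem.Dict.getD_modify]
    by_cases h : pvFirst e = y
    · simp [h]
    · rw [if_neg h, if_neg (fun hh : y = pvFirst e => h hh.symm)]

theorem sum_by_year_spec_aux (enrolment : List (List Int)) :
    sum_by_year enrolment = sum_by_year_alt enrolment := by
  unfold sum_by_year sum_by_year_alt
  set d := enrolment.foldl (fun d rec => d.modify (pvFirst rec) 0 (· + pvLast rec))
            PySem.Dict.empty with hd
  -- A's first loop is PySem.Set.ofList (enrolment.map pvFirst)
  have hyear : enrolment.foldl
      (fun acc elem => if pvFirst elem ∈ acc then acc else acc ++ [pvFirst elem]) []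
      = PySem.Set.ofList (enrolment.map pvFirst) := by
    have hf : (fun acc elem => if pvFirst elem ∈ acc then acc else acc ++ [pvFirst elem])
        = fun (acc : List Int) elem => PySem.Set.add acc (pvFirst elem) := by
      funext acc elem; rw [PySem.Set.add_eq_ite]
    rw [hf, PySem.Set.ofList_eq_foldl, List.foldl_map]
  -- B's dict keys are the same set
  have hkeys : d.keys = PySem.Set.ofList (enrolment.map pvFirst) := by
    rw [hd, PySem.Dict.keys_foldl_modify_key]
    simp [PySem.Set.update]
    rw [PySem.Set.ofList_eq_foldl]
  have hnodup : d.keys.Nodup := by rw [hkeys]; exact PySem.Set.nodup_ofList _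
  -- A's outer append-fold is a map over year_list
  rw [hyear, PySem.List.foldl_append_singleton_eq_map, ← hkeys]
  -- B's items.map as a map over keys
  have : d.items.map (fun p => [p.1, p.2])
      = d.keys.map (fun y => [y, d.getD y 0]) := by
    show d.items.map (fun p => [p.1, p.2]) = (d.items.map (·.1)).map (fun y => [y, d.getD y 0])
    rw [List.map_map]
    refine List.map_congr_left (fun p hp => ?_)
    obtain ⟨k, v⟩ := p
    simp only [Function.comp]
    rw [PySem.Dict.getD_of_mem_items d hp hnodup]
  rw [this]
  refine List.map_congr_left (fun y _ => ?_)
  rw [hd, pv_getD_fold]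
  simp [PySem.Dict.getD_empty]

-- ===== VERDICT (by name: the statement is the Claim_ definition above) =====
theorem sum_by_year_spec : Claim_equal_sum_by_year := by
  intro enrolment _ _
  unfold Spec_sum_by_year
  exact sum_by_year_spec_aux enrolment
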